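-- pv_equiv track=rewrite | github.com/zeke-sys/AlgoRepo | 3104HW1.py | insert_into
-- ===== SOURCE A (Python) =====
-- def swap(a, i, j):
--     #temp = a[i]
--     #a[i] = a[j]
--     #a[j] = temp
--     a[i], a[j] = a[j], a[i]  # Pythonic way to swap
--     return a #returns the modified array
--
-- def insert_into(a, j):
--     count = 0
--     a.append(j)  # Add j to the end of the array
--     i = len(a) - 1  # Start from the last element
--     while i > 0 and a[i-1] > a[i]:
--         swap(a, i-1, i)  # Swap the elements
--         count += 1
--         i -= 1
--     return count
-- ===== SOURCE B (Python) =====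
-- def insert_into(a, j):
--     # Count the contiguous trailing elements greater than j, then do ONE insert.
--     count = 0
--     for x in reversed(a):
--         if x > j:
--             count += 1
--         else:
--             break
--     a.insert(len(a) - count, j)
--     return count
-- ===== Notes on version B (the rewrite author's own statement) =====
-- stated objective: simpler
-- what changed: A bubbles j leftward with repeated swaps after appending it; B just counts the trailing run of elements greater than j with a backward scan and performs a single insert, no swaps.
import Mathlib
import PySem

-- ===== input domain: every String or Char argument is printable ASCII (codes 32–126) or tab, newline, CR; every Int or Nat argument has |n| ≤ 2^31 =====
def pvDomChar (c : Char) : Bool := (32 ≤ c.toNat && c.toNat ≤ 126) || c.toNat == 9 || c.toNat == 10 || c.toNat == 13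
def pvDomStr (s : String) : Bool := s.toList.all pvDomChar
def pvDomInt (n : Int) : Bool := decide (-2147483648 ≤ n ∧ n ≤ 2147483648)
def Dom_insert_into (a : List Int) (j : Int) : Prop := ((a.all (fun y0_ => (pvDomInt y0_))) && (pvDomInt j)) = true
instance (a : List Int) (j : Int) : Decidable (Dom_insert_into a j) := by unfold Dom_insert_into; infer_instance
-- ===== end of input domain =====

-- B replaces A's swap-bubbling loop by a count-then-single-insert decomposition (simpler);
-- both mutate `a` identically in Python; the theorem is about the returned count.
-- ===== PORT A =====
-- a[i], a[j] = a[j], a[i]  (simultaneous assignment, both reads from the old list)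
def pySwap (a : List Int) (i k : Nat) : List Int :=
  (a.set i (a.getD k 0)).set k (a.getD i 0)

-- while i > 0 and a[i-1] > a[i]: swap(a, i-1, i); count += 1; i -= 1
def insertLoopA : List Int → Nat → Int → Int
  | _, 0, count => count
  | a, k + 1, count =>
      if a.getD k 0 > a.getD (k + 1) 0 then
        insertLoopA (pySwap a k (k + 1)) k (count + 1)
      else count

def insert_into (a : List Int) (j : Int) : Int :=
  let a' := a ++ [j]
  insertLoopA a' (a'.length - 1) 0

-- ===== PORT B =====
-- B's backward for-loop over reversed(a) with break: count the trailing run of elements > j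
def countTail : List Int → Int → Int
  | [], _ => 0
  | x :: r, j => if x > j then countTail r j + 1 else 0

def insert_into_alt (a : List Int) (j : Int) : Int :=
  countTail a.reverse j
-- ===== PRECONDITION & SPEC =====
def Spec_insert_into (a : List Int) (j : Int) (out : Int) : Prop := out = insert_into_alt a j
instance (a : List Int) (j : Int) (out : Int) : Decidable (Spec_insert_into a j out) := by unfold Spec_insert_into; infer_instance

-- ===== CLAIM (what is proved, stated in full; the proofs are below) =====
def Claim_equal_insert_into : Prop := ∀ (a : List Int) (j : Int), Dom_insert_into a j → Spec_insert_into a j (insert_into a j)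

-- ===== LEMMAS AND PROOFS =====
theorem set_append_cons (q : List Int) (v x : Int) (t : List Int) :
    (q ++ x :: t).set q.length v = q ++ v :: t := by
  induction q with
  | nil => rfl
  | cons h r ih => simp [ih]

theorem getD_append_len (q : List Int) (x : Int) (t : List Int) :
    (q ++ x :: t).getD q.length 0 = x := by
  induction q with
  | nil => rfl
  | cons h r ih => simpa using ih

theorem swap_at (q : List Int) (x y : Int) (t : List Int) :
    pySwap (q ++ x :: y :: t) q.length (q.length + 1) = q ++ y :: x :: t := by
  unfold pySwap
  have h1 : (q ++ x :: y :: t).getD (q.length + 1) 0 = y := by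
    simpa using getD_append_len (q ++ [x]) y t
  have h2 : (q ++ x :: y :: t).getD q.length 0 = x := getD_append_len q x (y :: t)
  rw [h1, h2, set_append_cons q y x (y :: t)]
  simpa using set_append_cons (q ++ [y]) x x t

theorem loopA_eq (p : List Int) (j : Int) (s : List Int) (c : Int) :
    insertLoopA (p ++ j :: s) p.length c = c + countTail p.reverse j := by
  induction p using List.reverseRecOn generalizing s c with
  | nil => simp [insertLoopA, countTail]
  | append_singleton q x ih =>
      have hlen : (q ++ [x]).length = q.length + 1 := by simp
      have hget1 : ((q ++ [x]) ++ j :: s).getD q.length 0 = x := by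
        simpa using getD_append_len q x (j :: s)
      have hget2 : ((q ++ [x]) ++ j :: s).getD (q.length + 1) 0 = j := by
        simpa using getD_append_len (q ++ [x]) j s
      rw [hlen]
      by_cases hx : x > j
      · have hswap : pySwap ((q ++ [x]) ++ j :: s) q.length (q.length + 1)
            = q ++ j :: x :: s := by
          simpa using swap_at q x j s
        simp only [insertLoopA, hget1, hget2, if_pos hx, hswap]
        rw [ih (x :: s) (c + 1)]
        simp [countTail, hx]
        ring
      · simp only [insertLoopA, hget1, hget2, if_neg hx]
        simp [countTail, hx]

-- ===== VERDICT (by name: the statement is the Claim_ definition above) =====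
theorem insert_into_spec : Claim_equal_insert_into := by
  intro a j _
  unfold Spec_insert_into insert_into insert_into_alt
  have h := loopA_eq a j [] 0
  simpa using h
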